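-- pv_equiv track=rewrite | github.com/jeffrelt/RandomGoodness | python/horses.py | dpHorses
-- ===== SOURCE A (Python) =====
-- class result:
--     def __init__(self, so_far = 0, white = 0, black = 0):
--         self.so_far = so_far;
--         self.color = [white,black]
--
--     def add(self, horse):
--         temp = result(self.so_far,self.color[0],self.color[1])
--         temp.color[horse]+=1
--         return temp
--
--     def next(self, horse=None):
--         temp = result(self.score())
--         if horse != None:
--             temp.color[horse]+=1
--         return temp
--
--     def score(self):
--         return self.so_far + self.color[0]*self.color[1]
--
-- def dpHorses(colors, stable_count):
--     ''' dp solution - actually easier than the recursive one (certainly to debug)'''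
--     dp = [[None for _ in range(stable_count)] for _ in range(len(colors))]
--     for i, horse in enumerate(colors):
--         for stable in range(min(stable_count,i+1)):
--             if i == 0:
--                 dp[i][stable] = result().add(horse)
--             elif stable == 0:
--                 dp[i][stable] = dp[i-1][stable].add(colors[horse])
--             elif i == stable:
--                 dp[i][stable] = result().add(colors[horse])
--             else:
--                 a = dp[i-1][stable].add(colors[horse])
--                 b = dp[i-1][stable-1].next(colors[horse])
--                 dp[i][stable] = a if a.score() < b.score() else b
--
--     return dp[len(colors)-1][stable_count-1].score()
-- ===== SOURCE B (Python) =====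
-- def dpHorses(colors, stable_count):
--     """Top-down memoized recursion over (horse index, stable index) on plain
--     (so_far, [white, black]) pairs; same cases, tie-breaking and
--     colors[colors[i]] indexing as the bottom-up table DP."""
--     memo = {}
--
--     def score(st):
--         so_far, color = st
--         return so_far + color[0] * color[1]
--
--     def bump(st, h):
--         so_far, color = st
--         color = color.copy()
--         color[h] += 1
--         return (so_far, color)
--
--     def f(i, s):
--         if (i, s) not in memo:
--             if i == 0:
--                 r = bump((0, [0, 0]), colors[0])
--             elif s == 0:
--                 r = bump(f(i - 1, 0), colors[colors[i]])
--             elif i == s: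
--                 r = bump((0, [0, 0]), colors[colors[i]])
--             else:
--                 h = colors[colors[i]]
--                 a = bump(f(i - 1, s), h)
--                 b = bump((score(f(i - 1, s - 1)), [0, 0]), h)
--                 r = a if score(a) < score(b) else b
--             memo[(i, s)] = r
--         return memo[(i, s)]
--
--     return score(f(len(colors) - 1, stable_count - 1))
-- ===== Notes on version B (the rewrite author's own statement) =====
-- stated objective: alternative
-- what changed: Replaces the bottom-up None-initialised 2-D table DP over result objects by a top-down memoized recursion f(i, stable) on plain (so_far, [white, black]) states, with the same cases, tie-breaking and colors[colors[i]] indexing.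
import Mathlib
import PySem

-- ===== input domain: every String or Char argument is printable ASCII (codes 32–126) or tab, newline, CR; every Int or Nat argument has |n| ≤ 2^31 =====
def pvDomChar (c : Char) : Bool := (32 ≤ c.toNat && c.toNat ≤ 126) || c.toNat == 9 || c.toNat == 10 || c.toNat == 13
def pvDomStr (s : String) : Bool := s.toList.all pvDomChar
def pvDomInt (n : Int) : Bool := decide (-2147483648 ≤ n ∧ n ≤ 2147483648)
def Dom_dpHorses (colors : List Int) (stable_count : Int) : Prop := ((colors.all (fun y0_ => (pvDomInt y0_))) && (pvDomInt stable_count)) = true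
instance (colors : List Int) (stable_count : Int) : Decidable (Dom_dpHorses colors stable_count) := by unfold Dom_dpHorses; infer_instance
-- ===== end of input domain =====

-- B replaces the bottom-up None-initialised 2-D table DP over result objects by a
-- top-down recursion on (horse index, stable index) over plain (so_far, [white, black])
-- states (memoized in Python); same cases, tie-breaking and colors[colors[i]] indexing.

-- ===== PORT A =====
-- result objects are (so_far, white, black); score = so_far + white*black
def pvA_score (r : Int × Int × Int) : Int := r.1 + r.2.1 * r.2.2

-- temp.color[horse] += 1 on the 2-element list [white, black]: Python indices
-- 0/-2 hit white, 1/-1 hit black, any other index raises IndexError (outside Pre_).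
def pvA_add (r : Int × Int × Int) (h : Int) : Int × Int × Int :=
  if h = 0 ∨ h = -2 then (r.1, r.2.1 + 1, r.2.2)
  else if h = 1 ∨ h = -1 then (r.1, r.2.1, r.2.2 + 1)
  else r

-- colors[idx]; none = IndexError in Python, excluded by Pre_
def pvA_get (colors : List Int) (idx : Int) : Int := (PySem.List.pyGet? colors idx).getD 0

-- dp[i][stable] from the previous row dp[i-1] (entries still None are never read
-- on Pre_ inputs; the .getD defaults stand for Python's AttributeError there)
def pvA_cell (colors : List Int) (prev : List (Int × Int × Int)) (i s : Int) : Int × Int × Int :=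
  if i = 0 then pvA_add (0, 0, 0) (pvA_get colors i)
  else if s = 0 then pvA_add ((PySem.List.pyGet? prev s).getD (0, 0, 0)) (pvA_get colors (pvA_get colors i))
  else if i = s then pvA_add (0, 0, 0) (pvA_get colors (pvA_get colors i))
  else
    let h := pvA_get colors (pvA_get colors i)
    let a := pvA_add ((PySem.List.pyGet? prev s).getD (0, 0, 0)) h
    let b := pvA_add (pvA_score ((PySem.List.pyGet? prev (s - 1)).getD (0, 0, 0)), 0, 0) h
    if pvA_score a < pvA_score b then a else b

-- the filled prefix of row i (the None tail of the pre-allocated row is never read on Pre_ inputs)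
def pvA_row (colors : List Int) (prev : List (Int × Int × Int)) (i sc : Int) : List (Int × Int × Int) :=
  (PySem.List.pyRange 0 (min sc (i + 1)) 1).foldl (fun row s => row ++ [pvA_cell colors prev i s]) []

def dpHorses (colors : List Int) (stable_count : Int) : Int :=
  let dp := (PySem.List.pyRange 0 (colors.length : Int) 1).foldl
    (fun dp i => dp ++ [pvA_row colors (dp.getLastD []) i stable_count]) []
  pvA_score ((PySem.List.pyGet? ((PySem.List.pyGet? dp ((colors.length : Int) - 1)).getD []) (stable_count - 1)).getD (0, 0, 0))

-- ===== PORT B =====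
-- B's (so_far, [white, black]) state as a triple; score = so_far + white*black
def pvB_score (st : Int × Int × Int) : Int := st.1 + st.2.1 * st.2.2

-- color[h] += 1 on the copied 2-element list: indices 0/-2 hit white, 1/-1 hit
-- black, any other index raises IndexError in Python (outside Pre_)
def pvB_bump (st : Int × Int × Int) (h : Int) : Int × Int × Int :=
  if h = 0 ∨ h = -2 then (st.1, st.2.1 + 1, st.2.2)
  else if h = 1 ∨ h = -1 then (st.1, st.2.1, st.2.2 + 1)
  else st

-- colors[idx]; none = IndexError in Python, excluded by Pre_
def pvB_get (colors : List Int) (idx : Int) : Int := (PySem.List.pyGet? colors idx).getD 0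

-- f(i, s) of Source B (the Python memo only caches this pure recursion); i < 0 in
-- Python (RecursionError, outside Pre_) is represented by the Nat i
def pvB_f (colors : List Int) : Nat → Int → Int × Int × Int
  | 0, _ => pvB_bump (0, 0, 0) (pvB_get colors 0)
  | (i + 1), s =>
    let h := pvB_get colors (pvB_get colors ((i : Int) + 1))
    if s = 0 then pvB_bump (pvB_f colors i 0) h
    else if (i : Int) + 1 = s then pvB_bump (0, 0, 0) h
    else
      let a := pvB_bump (pvB_f colors i s) h
      let b := pvB_bump (pvB_score (pvB_f colors i (s - 1)), 0, 0) h
      if pvB_score a < pvB_score b then a else b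

def dpHorses_alt (colors : List Int) (stable_count : Int) : Int :=
  pvB_score (pvB_f colors (colors.length - 1) (stable_count - 1))

-- ===== PRECONDITION & SPEC =====
-- Exactly the inputs on which A returns: 1 ≤ stable_count ≤ len(colors) (else the
-- final dp lookup raises IndexError / AttributeError on None), colors[0] is a valid
-- Python index into the 2-element color list, and for every later position i the
-- value colors[i] is a valid index into colors and colors[colors[i]] a valid index
-- into the color list (else add/next raises IndexError).
def Pre_dpHorses (colors : List Int) (stable_count : Int) : Prop :=
  1 ≤ stable_count ∧ stable_count ≤ (colors.length : Int) ∧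
  (-2 ≤ PySem.List.pyGetD colors 0 0 ∧ PySem.List.pyGetD colors 0 0 ≤ 1) ∧
  ∀ i : Nat, i < colors.length → 1 ≤ i →
    PySem.Raise.InRange colors.length (PySem.List.pyGetD colors (i : Int) 0) ∧
    -2 ≤ PySem.List.pyGetD colors (PySem.List.pyGetD colors (i : Int) 0) 0 ∧
    PySem.List.pyGetD colors (PySem.List.pyGetD colors (i : Int) 0) 0 ≤ 1

instance (colors : List Int) (stable_count : Int) : Decidable (Pre_dpHorses colors stable_count) := by
  unfold Pre_dpHorses; infer_instance

def pvWitness_dpHorses : List Int × Int := ([0, 1, 1, 0], 2)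

def Spec_dpHorses (colors : List Int) (stable_count : Int) (out : Int) : Prop := out = dpHorses_alt colors stable_count
instance (colors : List Int) (stable_count : Int) (out : Int) : Decidable (Spec_dpHorses colors stable_count out) := by unfold Spec_dpHorses; infer_instance

-- ===== CLAIM (what is proved, stated in full; the proofs are below) =====
def Claim_equal_dpHorses : Prop := ∀ (colors : List Int) (stable_count : Int), Dom_dpHorses colors stable_count → Pre_dpHorses colors stable_count → Spec_dpHorses colors stable_count (dpHorses colors stable_count)

-- ===== LEMMAS AND PROOFS =====

theorem pv_get_eq : pvA_get = pvB_get := rfl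

theorem pv_score_eq : pvA_score = pvB_score := rfl

theorem pv_add_eq_bump : pvA_add = pvB_bump := rfl

-- the filled part of row i, expressed through B's recursion
def pvRowSpec (colors : List Int) (k i : Nat) : List (Int × Int × Int) :=
  (List.range (min k (i + 1))).map (fun s : Nat => pvB_f colors i (s : Int))

theorem pvRowSpec_get (colors : List Int) (k i s : Nat) (hs : s < min k (i + 1)) :
    PySem.List.pyGet? (pvRowSpec colors k i) (s : Int) = some (pvB_f colors i (s : Int)) := by
  rw [PySem.List.pyGet?_natCast]
  unfold pvRowSpec
  rw [List.getElem?_map, List.getElem?_range hs]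
  rfl

theorem pv_cell_eq (colors : List Int) (k : Nat)
    (prev : List (Int × Int × Int)) (i s : Nat) (hs : s < min k (i + 1))
    (hprev : ∀ j : Nat, i = j + 1 → prev = pvRowSpec colors k j) :
    pvA_cell colors prev (i : Int) (s : Int) = pvB_f colors i (s : Int) := by
  match i with
  | 0 =>
    have hs0 : s = 0 := by omega
    subst hs0
    simp only [pvA_cell, Nat.cast_zero, if_true, pv_get_eq, pv_add_eq_bump]
    rw [pvB_f]
  | (j + 1) =>
    have hij : ((j : Int) + 1) ≠ 0 := by omega
    have hcast : ((j + 1 : Nat) : Int) = (j : Int) + 1 := by push_cast; ring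
    rw [hprev j rfl, pvB_f]
    simp only [pvA_cell, hcast, if_neg hij, pv_get_eq, pv_score_eq, pv_add_eq_bump]
    by_cases h0 : (s : Int) = 0
    · have hs0 : s = 0 := by omega
      subst hs0
      have g0 := pvRowSpec_get colors k j 0 (by omega)
      simp only [Nat.cast_zero] at g0 ⊢
      simp only [if_true, g0, Option.getD_some]
    · rw [if_neg h0, if_neg h0]
      by_cases heq : ((j : Int) + 1) = (s : Int)
      · rw [if_pos heq, if_pos heq]
      · rw [if_neg heq, if_neg heq]
        have hsj : s < min k (j + 1) := by omega
        have hsj1 : s - 1 < min k (j + 1) := by omega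
        have hc1 : ((s : Int) - 1) = ((s - 1 : Nat) : Int) := by omega
        rw [pvRowSpec_get colors k j s hsj, hc1, pvRowSpec_get colors k j (s - 1) hsj1]
        simp only [Option.getD_some]

theorem pv_row_eq (colors : List Int) (k : Nat)
    (prev : List (Int × Int × Int)) (i : Nat)
    (hprev : ∀ j : Nat, i = j + 1 → prev = pvRowSpec colors k j) :
    pvA_row colors prev (i : Int) (k : Int) = pvRowSpec colors k i := by
  have hmin : min (k : Int) ((i : Int) + 1) = ((min k (i + 1) : Nat) : Int) := by omega
  unfold pvA_row pvRowSpec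
  rw [PySem.List.foldl_append_singleton_eq_map, hmin, PySem.List.pyRange_zero_natCast,
    List.map_map, List.nil_append]
  apply List.map_congr_left
  intro s hsmem
  have hs : s < min k (i + 1) := List.mem_range.mp hsmem
  simpa using pv_cell_eq colors k prev i s hs hprev

theorem pv_fold_eq (colors : List Int) (k : Nat) :
    ∀ (m : Nat),
      (PySem.List.pyRange 0 (m : Int) 1).foldl
        (fun dp i => dp ++ [pvA_row colors (dp.getLastD []) i (k : Int)]) []
      = (List.range m).map (pvRowSpec colors k) := by
  intro m
  induction m with
  | zero => simp
  | succ m ih =>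
    have hcast : ((m + 1 : Nat) : Int) = (m : Int) + 1 := by push_cast; ring
    rw [hcast, PySem.List.pyRange_one_succ_right (by omega), List.foldl_append, ih,
      List.range_succ, List.map_append]
    simp only [List.foldl_cons, List.foldl_nil, List.map_cons, List.map_nil]
    congr 1
    have hprev : ∀ j : Nat, m = j + 1 →
        ((List.range m).map (pvRowSpec colors k)).getLastD [] = pvRowSpec colors k j := by
      intro j hj
      subst hj
      simp [List.range_succ]
    refine congrArg (fun l => [l]) ?_
    exact pv_row_eq colors k _ m hprev

-- ===== VERDICT (by name: the statement is the Claim_ definition above) =====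
theorem dpHorses_spec : Claim_equal_dpHorses := by
  intro colors sc _hdom hpre
  obtain ⟨h1, h2, -, -⟩ := hpre
  unfold Spec_dpHorses
  obtain ⟨k, hk⟩ : ∃ k : Nat, sc = (k : Int) := ⟨sc.toNat, by omega⟩
  subst hk
  have hn1 : 1 ≤ colors.length := by omega
  have hk1 : 1 ≤ k := by omega
  simp only [dpHorses, dpHorses_alt]
  rw [pv_fold_eq colors k colors.length]
  have hc1 : ((colors.length : Int) - 1) = ((colors.length - 1 : Nat) : Int) := by omega
  have hc2 : ((k : Int) - 1) = ((k - 1 : Nat) : Int) := by omega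
  rw [hc1, PySem.List.pyGet?_natCast]
  rw [List.getElem?_map, List.getElem?_range (by omega)]
  simp only [Option.map_some, Option.getD_some]
  rw [hc2, pvRowSpec_get colors k (colors.length - 1) (k - 1) (by omega)]
  simp only [Option.getD_some, pv_score_eq]
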